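-- pv_equiv track=rewrite | github.com/olivkoch/adventofcode | 2023/s18.2.py | instructions_to_vertices
-- ===== SOURCE A (Python) =====
-- def instructions_to_vertices(ins):
--     ans = [[0,0]]
--     count = 0
--     for x in ins:
--         z = ans[-1][:]
--         d = x[0]
--         s = x[1]
--         count += s
--         if d == 'R':
--             z[1] += s
--         if d == 'L':
--             z[1] -= s
--         if d == 'U':
--             z[0] -= s
--         if d == 'D':
--             z[0] += s
--         ans.append(z)
--     m1 = min([x[0] for x in ans])
--     m2 = min([x[1] for x in ans])
--     ans = [[x[0]-m1, x[1]-m2] for x in ans]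
--     return ans[:-1], count
-- ===== SOURCE B (Python) =====
-- def instructions_to_vertices(ins):
--     VEC = {'R': (0, 1), 'L': (0, -1), 'U': (-1, 0), 'D': (1, 0)}
--     deltas = [(VEC.get(d, (0, 0))[0] * s, VEC.get(d, (0, 0))[1] * s) for d, s in ins]
--     # walk the path BACKWARDS from its total displacement, reconstructing each
--     # vertex by subtracting the deltas, while tracking the running minima
--     r = sum(dr for dr, _ in deltas)
--     c = sum(dc for _, dc in deltas)
--     m1, m2 = r, c
--     out = []
--     for dr, dc in reversed(deltas):
--         r -= dr
--         c -= dc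
--         out.append((r, c))
--         m1 = min(m1, r)
--         m2 = min(m2, c)
--     return [[a - m1, b - m2] for a, b in reversed(out)], sum(s for _, s in ins)
-- ===== Notes on version B (the rewrite author's own statement) =====
-- stated objective: alternative
-- what changed: B maps instructions to delta vectors, sums them for the end position, then reconstructs the vertices by walking the reversed deltas backwards from that total while tracking the minima on the fly, instead of A's forward loop that copies the last row of a growing list-of-lists through four if-branches and then takes two separate min passes.
import Mathlib
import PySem

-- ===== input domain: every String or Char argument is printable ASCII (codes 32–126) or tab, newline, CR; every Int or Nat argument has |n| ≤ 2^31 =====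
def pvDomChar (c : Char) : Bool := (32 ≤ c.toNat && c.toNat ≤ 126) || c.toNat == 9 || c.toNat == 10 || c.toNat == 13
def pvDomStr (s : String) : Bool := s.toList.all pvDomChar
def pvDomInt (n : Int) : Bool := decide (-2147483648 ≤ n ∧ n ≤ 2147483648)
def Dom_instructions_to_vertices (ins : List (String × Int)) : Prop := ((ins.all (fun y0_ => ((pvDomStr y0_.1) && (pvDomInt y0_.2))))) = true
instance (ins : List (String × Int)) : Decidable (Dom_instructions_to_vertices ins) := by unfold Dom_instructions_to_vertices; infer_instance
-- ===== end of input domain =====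

-- B rebuilds the vertex path BACKWARDS: it maps instructions to delta vectors, sums them for the
-- end position, then walks the reversed deltas subtracting each, tracking minima on the fly
-- (objective: alternative — opposite traversal order, no growing copy-the-last-row list).

-- ===== PORT A =====
-- loop body of A: copy last vertex, apply the four ifs, append; count += s
def pvA_step (st : List (List Int) × Int) (x : String × Int) : List (List Int) × Int :=
  let ans := st.1
  let z := (PySem.List.pyGet? ans (-1)).getD []   -- z = ans[-1][:]  (ans is never empty)
  let d := x.1
  let s := x.2
  let count := st.2 + s
  let z := if d == "R" then z.set 1 (((PySem.List.pyGet? z 1).getD 0) + s) else z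
  let z := if d == "L" then z.set 1 (((PySem.List.pyGet? z 1).getD 0) - s) else z
  let z := if d == "U" then z.set 0 (((PySem.List.pyGet? z 0).getD 0) - s) else z
  let z := if d == "D" then z.set 0 (((PySem.List.pyGet? z 0).getD 0) + s) else z
  (ans ++ [z], count)

def instructions_to_vertices (ins : List (String × Int)) : List (List Int) × Int :=
  let st := ins.foldl pvA_step ([[0, 0]], 0)
  let ans := st.1
  -- min([x[0] for x in ans]) / min([x[1] for x in ans]); ans is nonempty, each x has length 2
  let m1 := (PySem.List.min? (ans.map (fun x => (PySem.List.pyGet? x 0).getD 0)) (fun y => y)).getD 0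
  let m2 := (PySem.List.min? (ans.map (fun x => (PySem.List.pyGet? x 1).getD 0)) (fun y => y)).getD 0
  let ans := ans.map (fun x => [((PySem.List.pyGet? x 0).getD 0) - m1, ((PySem.List.pyGet? x 1).getD 0) - m2])
  (PySem.List.slice ans none (some (-1)), st.2)

-- ===== PORT B =====
def pvVec : PySem.Dict String (Int × Int) :=
  PySem.Dict.ofList [("R", (0, 1)), ("L", (0, -1)), ("U", (-1, 0)), ("D", (1, 0))]

-- loop body of B: step backwards by one delta, append the vertex, update the running minima
def pvBack_step (st : List (Int × Int) × Int × Int × Int × Int) (d : Int × Int) :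
    List (Int × Int) × Int × Int × Int × Int :=
  let r := st.2.1 - d.1
  let c := st.2.2.1 - d.2
  (st.1 ++ [(r, c)], r, c, min st.2.2.2.1 r, min st.2.2.2.2 c)

def instructions_to_vertices_alt (ins : List (String × Int)) : List (List Int) × Int :=
  let deltas := ins.map (fun x => ((pvVec.getD x.1 (0, 0)).1 * x.2, (pvVec.getD x.1 (0, 0)).2 * x.2))
  let r := (deltas.map Prod.fst).sum
  let c := (deltas.map Prod.snd).sum
  let st := deltas.reverse.foldl pvBack_step ([], r, c, r, c)
  (st.1.reverse.map (fun v => [v.1 - st.2.2.2.1, v.2 - st.2.2.2.2]),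
   (ins.map Prod.snd).sum)

-- ===== PRECONDITION & SPEC =====
def Spec_instructions_to_vertices (ins : List (String × Int)) (out : List (List Int) × Int) : Prop := out = instructions_to_vertices_alt ins
instance (ins : List (String × Int)) (out : List (List Int) × Int) : Decidable (Spec_instructions_to_vertices ins out) := by unfold Spec_instructions_to_vertices; infer_instance

-- ===== CLAIM (what is proved, stated in full; the proofs are below) =====
def Claim_equal_instructions_to_vertices : Prop := ∀ (ins : List (String × Int)), Dom_instructions_to_vertices ins → Spec_instructions_to_vertices ins (instructions_to_vertices ins)

-- ===== LEMMAS AND PROOFS =====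

-- [r, c] as a 2-element list
def pvToL (p : Int × Int) : List Int := [p.1, p.2]

-- the delta vector of one instruction
def pvDelta (x : String × Int) : Int × Int :=
  ((pvVec.getD x.1 (0, 0)).1 * x.2, (pvVec.getD x.1 (0, 0)).2 * x.2)

-- proof-side forward step (A's loop on coordinate pairs)
def pvFwd_step (st : List (Int × Int) × Int × Int) (x : String × Int) : List (Int × Int) × Int × Int :=
  let r := st.2.1 + (pvDelta x).1
  let c := st.2.2 + (pvDelta x).2
  (st.1 ++ [(r, c)], r, c)

-- forward positions after each instruction
def pvFwdP : List (String × Int) → Int → Int → List (Int × Int)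
  | [], _, _ => []
  | x :: t, r, c => (r + (pvDelta x).1, c + (pvDelta x).2) ::
      pvFwdP t (r + (pvDelta x).1) (c + (pvDelta x).2)

-- backward positions after subtracting each delta
def pvTrail : List (Int × Int) → Int → Int → List (Int × Int)
  | [], _, _ => []
  | d :: t, r, c => (r - d.1, c - d.2) :: pvTrail t (r - d.1) (c - d.2)

-- evaluate the direction table at an arbitrary key
lemma pv_table_eval (d : String) : pvVec.getD d (0, 0) =
    if d = "R" then ((0 : Int), (1 : Int)) else if d = "L" then (0, -1)
    else if d = "U" then (-1, 0) else if d = "D" then (1, 0) else (0, 0) := by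
  show ((((PySem.Dict.empty.insert "R" ((0 : Int), (1 : Int))).insert "L" (0, -1)).insert "U"
      (-1, 0)).insert "D" (1, 0)).getD d (0, 0) = _
  simp [PySem.Dict.getD_insert, PySem.Dict.getD_empty]
  split_ifs <;> simp_all

-- A's four-if chain on z = [r, c] equals one table-driven delta
lemma pv_chain (d : String) (s r c : Int) :
    (let z : List Int := [r, c]
     let z := if d == "R" then z.set 1 (((PySem.List.pyGet? z 1).getD 0) + s) else z
     let z := if d == "L" then z.set 1 (((PySem.List.pyGet? z 1).getD 0) - s) else z
     let z := if d == "U" then z.set 0 (((PySem.List.pyGet? z 0).getD 0) - s) else z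
     if d == "D" then z.set 0 (((PySem.List.pyGet? z 0).getD 0) + s) else z)
    = [r + (pvVec.getD d (0, 0)).1 * s, c + (pvVec.getD d (0, 0)).2 * s] := by
  rw [pv_table_eval]
  by_cases hR : d = "R"
  · simp [hR, PySem.List.pyGet?, PySem.List.pyIdx?]
  by_cases hL : d = "L"
  · simp [hL, PySem.List.pyGet?, PySem.List.pyIdx?]; ring
  by_cases hU : d = "U"
  · simp [hU, PySem.List.pyGet?, PySem.List.pyIdx?]; ring
  by_cases hD : d = "D"
  · simp [hD, PySem.List.pyGet?, PySem.List.pyIdx?]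
  · simp [hR, hL, hU, hD]

-- A's fold equals the pair-based forward fold together with the sum of steps
lemma pv_loop (ins : List (String × Int)) :
    ∀ (pref : List (Int × Int)) (r c count : Int),
    ins.foldl pvA_step ((pref ++ [(r, c)]).map pvToL, count)
    = (((ins.foldl pvFwd_step (pref ++ [(r, c)], r, c)).1).map pvToL,
       count + (ins.map Prod.snd).sum) := by
  induction ins with
  | nil => intro pref r c count; simp
  | cons x t ih =>
    intro pref r c count
    have hstep : pvA_step ((pref ++ [(r, c)]).map pvToL, count) x
        = (((pref ++ [(r, c)]) ++ [(r + (pvDelta x).1, c + (pvDelta x).2)]).map pvToL,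
           count + x.2) := by
      have hz : (PySem.List.pyGet? ((pref ++ [(r, c)]).map pvToL) (-1)).getD []
          = pvToL (r, c) := by
        rw [List.map_append]
        simp [PySem.List.pyGet?_neg_one_append_singleton]
      simp only [pvA_step, hz]
      have := pv_chain x.1 x.2 r c
      simp only [pvToL, pvDelta] at this ⊢
      rw [this]
      simp [pvToL]
    rw [List.foldl_cons, hstep, ih]
    simp only [List.foldl_cons, pvFwd_step]
    have hc : count + x.2 + (t.map Prod.snd).sum = count + ((x :: t).map Prod.snd).sum := by
      simp; ring
    rw [hc]

-- the forward fold's list is the start vertex followed by the forward positions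
lemma pv_fwd_char (ins : List (String × Int)) :
    ∀ (pref : List (Int × Int)) (r c : Int),
    (ins.foldl pvFwd_step (pref ++ [(r, c)], r, c)).1 = pref ++ (r, c) :: pvFwdP ins r c := by
  induction ins with
  | nil => intro pref r c; simp [pvFwdP]
  | cons x t ih =>
    intro pref r c
    simp only [List.foldl_cons, pvFwd_step, pvFwdP]
    have := ih (pref ++ [(r, c)]) (r + (pvDelta x).1) (c + (pvDelta x).2)
    simp only [List.append_assoc, List.cons_append, List.nil_append] at this ⊢
    exact this

-- A's fold, fully characterised
lemma pv_state_eq (ins : List (String × Int)) :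
    ins.foldl pvA_step ([[0, 0]], 0)
    = (((0, 0) :: pvFwdP ins 0 0).map pvToL, (ins.map Prod.snd).sum) := by
  have h := pv_loop ins [] 0 0 0
  have h2 := pv_fwd_char ins [] 0 0
  simp only [List.nil_append] at h h2
  rw [show ([[0, 0]] : List (List Int)) = List.map pvToL [(0, 0)] from by simp [pvToL], h, h2]
  simp

-- B's fold, fully characterised by pvTrail and min-folds
lemma pv_back_char (rs : List (Int × Int)) :
    ∀ (vs0 : List (Int × Int)) (r c m1 m2 : Int),
    rs.foldl pvBack_step (vs0, r, c, m1, m2)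
    = (vs0 ++ pvTrail rs r c, r - (rs.map Prod.fst).sum, c - (rs.map Prod.snd).sum,
       ((pvTrail rs r c).map Prod.fst).foldl min m1,
       ((pvTrail rs r c).map Prod.snd).foldl min m2) := by
  induction rs with
  | nil => intro vs0 r c m1 m2; simp [pvTrail]
  | cons d t ih =>
    intro vs0 r c m1 m2
    simp only [List.foldl_cons, pvBack_step, pvTrail, ih, List.map_cons, List.foldl_cons,
      List.append_assoc, List.singleton_append, List.map_cons, List.sum_cons]
    rw [sub_sub, sub_sub]

lemma pv_trail_append (a : List (Int × Int)) :
    ∀ (b : List (Int × Int)) (r c : Int),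
    pvTrail (a ++ b) r c = pvTrail a r c ++ pvTrail b (r - (a.map Prod.fst).sum) (c - (a.map Prod.snd).sum) := by
  induction a with
  | nil => intro b r c; simp [pvTrail]
  | cons d t ih =>
    intro b r c
    simp only [List.cons_append, pvTrail, ih, List.map_cons, List.sum_cons]
    congr 2; ring_nf

-- the forward path ends at the total displacement
lemma pv_fwd_last (ins : List (String × Int)) :
    ∀ (a b : Int),
    (a, b) :: pvFwdP ins a b
    = ((a, b) :: pvFwdP ins a b).dropLast
      ++ [(a + ((ins.map pvDelta).map Prod.fst).sum, b + ((ins.map pvDelta).map Prod.snd).sum)] := by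
  induction ins with
  | nil => intro a b; simp [pvFwdP]
  | cons x t ih =>
    intro a b
    have h := ih (a + (pvDelta x).1) (b + (pvDelta x).2)
    simp only [pvFwdP, List.map_cons, List.sum_cons]
    calc (a, b) :: ((a + (pvDelta x).1, b + (pvDelta x).2) :: pvFwdP t (a + (pvDelta x).1) (b + (pvDelta x).2))
        = (a, b) :: (((a + (pvDelta x).1, b + (pvDelta x).2) :: pvFwdP t _ _).dropLast
            ++ [(a + (pvDelta x).1 + ((t.map pvDelta).map Prod.fst).sum,
                 b + (pvDelta x).2 + ((t.map pvDelta).map Prod.snd).sum)]) := by rw [← h]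
      _ = _ := by
            simp only [List.dropLast_cons₂, List.cons_append]
            congr 3; ring_nf

-- walking the reversed deltas from the total displacement reconstructs the path (minus its end), reversed
lemma pv_trail_rev (ins : List (String × Int)) :
    ∀ (a b : Int),
    pvTrail (ins.map pvDelta).reverse (a + ((ins.map pvDelta).map Prod.fst).sum)
                                      (b + ((ins.map pvDelta).map Prod.snd).sum)
    = (((a, b) :: pvFwdP ins a b).dropLast).reverse := by
  induction ins with
  | nil => intro a b; simp [pvTrail, pvFwdP]
  | cons x t ih =>
    intro a b
    simp only [List.map_cons, List.reverse_cons, List.sum_cons]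
    rw [pv_trail_append]
    have hs1 : ((( t.map pvDelta).reverse).map Prod.fst).sum = ((t.map pvDelta).map Prod.fst).sum := by
      rw [List.map_reverse, List.sum_reverse]
    have hs2 : ((( t.map pvDelta).reverse).map Prod.snd).sum = ((t.map pvDelta).map Prod.snd).sum := by
      rw [List.map_reverse, List.sum_reverse]
    rw [hs1, hs2]
    have e1 : a + ((pvDelta x).1 + ((t.map pvDelta).map Prod.fst).sum)
        = (a + (pvDelta x).1) + ((t.map pvDelta).map Prod.fst).sum := by ring
    have e2 : b + ((pvDelta x).2 + ((t.map pvDelta).map Prod.snd).sum)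
        = (b + (pvDelta x).2) + ((t.map pvDelta).map Prod.snd).sum := by ring
    rw [e1, e2, ih]
    have htail : pvTrail [pvDelta x]
        ((a + (pvDelta x).1) + ((t.map pvDelta).map Prod.fst).sum - ((t.map pvDelta).map Prod.fst).sum)
        ((b + (pvDelta x).2) + ((t.map pvDelta).map Prod.snd).sum - ((t.map pvDelta).map Prod.snd).sum)
        = [(a, b)] := by
      simp only [pvTrail]
      congr 2 <;> ring
    rw [htail]
    simp only [pvFwdP, List.dropLast_cons₂, List.reverse_cons]

-- folding min onto a snoc equals folding it with the old init pushed into the list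
lemma pv_foldl_min_snoc (l : List Int) : ∀ (i x : Int),
    (l ++ [x]).foldl min i = (i :: l).foldl min x := by
  induction l with
  | nil => intro i x; simp [min_comm]
  | cons y t ih =>
    intro i x
    simp only [List.cons_append, List.foldl_cons]
    rw [ih (min i y) x]
    simp only [List.foldl_cons]
    congr 1
    rw [min_assoc]

-- folding min over a reversed list
lemma pv_foldl_min_rev (l : List Int) : ∀ (i : Int),
    l.reverse.foldl min i = l.foldl min i := by
  induction l with
  | nil => intro i; simp
  | cons x t ih =>
    intro i
    simp only [List.reverse_cons, List.foldl_cons]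
    rw [pv_foldl_min_snoc, List.foldl_cons, ih, min_comm x i]

-- min over 'm ++ [x]' written head-first equals folding from x over m
lemma pv_min_head_snoc (m : List Int) (x v0 : Int) (rest : List Int)
    (h : v0 :: rest = m ++ [x]) : rest.foldl min v0 = m.foldl min x := by
  cases m with
  | nil =>
    simp only [List.nil_append] at h
    injection h with h1 h2
    subst h1; subst h2; simp
  | cons a m' =>
    simp only [List.cons_append] at h
    injection h with h1 h2
    subst h1; subst h2
    rw [pv_foldl_min_snoc, List.foldl_cons]


-- LHS min (forward fold from 0) equals RHS min (backward fold from the total), fst component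
lemma pv_min_bridge_fst (ins : List (String × Int)) :
    List.foldl min 0 (List.map (fun x => x.1) (pvFwdP ins 0 0))
    = List.foldr (fun x y => min y x) (List.map (fun x => (pvDelta x).1) ins).sum
        ((0 :: List.map Prod.fst (pvFwdP ins 0 0)).dropLast) := by
  have h2 : (0 : Int) :: List.map Prod.fst (pvFwdP ins 0 0)
      = ((0 : Int) :: List.map Prod.fst (pvFwdP ins 0 0)).dropLast
        ++ [(List.map (fun x => (pvDelta x).1) ins).sum] := by
    have h := congrArg (List.map Prod.fst) (pv_fwd_last ins 0 0)
    simpa [List.map_dropLast, List.map_map, Function.comp_def] using h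
  rw [← List.foldl_reverse, pv_foldl_min_rev]
  exact pv_min_head_snoc _ _ _ _ h2

lemma pv_min_bridge_snd (ins : List (String × Int)) :
    List.foldl min 0 (List.map (fun x => x.2) (pvFwdP ins 0 0))
    = List.foldr (fun x y => min y x) (List.map (fun x => (pvDelta x).2) ins).sum
        ((0 :: List.map Prod.snd (pvFwdP ins 0 0)).dropLast) := by
  have h2 : (0 : Int) :: List.map Prod.snd (pvFwdP ins 0 0)
      = ((0 : Int) :: List.map Prod.snd (pvFwdP ins 0 0)).dropLast
        ++ [(List.map (fun x => (pvDelta x).2) ins).sum] := by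
    have h := congrArg (List.map Prod.snd) (pv_fwd_last ins 0 0)
    simpa [List.map_dropLast, List.map_map, Function.comp_def] using h
  rw [← List.foldl_reverse, pv_foldl_min_rev]
  exact pv_min_head_snoc _ _ _ _ h2

-- ===== VERDICT (by name: the statement is the Claim_ definition above) =====
theorem instructions_to_vertices_spec : Claim_equal_instructions_to_vertices := by
  intro ins _
  unfold Spec_instructions_to_vertices instructions_to_vertices instructions_to_vertices_alt
  rw [pv_state_eq]
  have hd : (fun x : String × Int => ((pvVec.getD x.1 (0, 0)).1 * x.2, (pvVec.getD x.1 (0, 0)).2 * x.2)) = pvDelta := rfl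
  simp only [hd]
  rw [pv_back_char]
  have htr : pvTrail (ins.map pvDelta).reverse (((ins.map pvDelta).map Prod.fst).sum)
      (((ins.map pvDelta).map Prod.snd).sum)
      = ((((0, 0) : Int × Int) :: pvFwdP ins 0 0).dropLast).reverse := by
    have h := pv_trail_rev ins 0 0
    simpa using h
  rw [htr]
  simp only [List.nil_append, List.reverse_reverse, List.map_reverse,
    PySem.List.slice_to_neg_one, List.map_map]
  simp [pvToL, PySem.List.pyGet?, PySem.List.pyIdx?, Function.comp_def, PySem.List.min?_id_cons]
  rw [pv_min_bridge_fst ins, pv_min_bridge_snd ins]
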